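-- pv_equiv track=rewrite | github.com/AGProjects/blink-qt | blink/contacts.py | reversed_range_iterator
-- ===== SOURCE A (Python) =====
-- def reversed_range_iterator(indexes):
--     """Return contiguous ranges from indexes starting from the end"""
--     end = last = None
--     for index in reversed(sorted(indexes)):
--         if end is None:
--             end = index
--         elif last - index > 1:
--             yield (last, end)
--             end = index
--         last = index
--     else:
--         if indexes:
--             yield (last, end)
-- ===== SOURCE B (Python) =====
-- def reversed_range_iterator(indexes):
--     """Return contiguous ranges from indexes starting from the end"""
--     runs = []
--     for i in sorted(indexes):
--         if runs and i - runs[-1][1] <= 1: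
--             runs[-1] = (runs[-1][0], i)
--         else:
--             runs.append((i, i))
--     for lo, hi in reversed(runs):
--         yield (lo, hi)
-- ===== Notes on version B (the rewrite author's own statement) =====
-- stated objective: alternative
-- what changed: Replaces A's descending streaming scan with scalar end/last bookkeeping and a trailing for-else yield by one ascending pass that builds an explicit table of (lo, hi) runs and then emits the table back-to-front.
import Mathlib
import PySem

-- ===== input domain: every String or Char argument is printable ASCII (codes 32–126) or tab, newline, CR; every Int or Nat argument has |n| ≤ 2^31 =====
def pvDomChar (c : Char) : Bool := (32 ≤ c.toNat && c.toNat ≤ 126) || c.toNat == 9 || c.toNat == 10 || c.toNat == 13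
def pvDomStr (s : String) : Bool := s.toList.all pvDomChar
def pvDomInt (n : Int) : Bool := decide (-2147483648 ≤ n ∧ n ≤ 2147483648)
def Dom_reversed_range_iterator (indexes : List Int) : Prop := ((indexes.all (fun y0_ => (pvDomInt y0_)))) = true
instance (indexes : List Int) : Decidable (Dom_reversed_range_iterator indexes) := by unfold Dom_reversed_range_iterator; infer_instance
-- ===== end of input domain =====

-- B replaces A's descending scan with scalar end/last bookkeeping by a single ascending
-- pass that builds an explicit runs table, then emits the table back-to-front.

-- ===== PORT A =====
-- state: (end?, last?, yields so far); Python's None → Option.none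
def pvALoop (st : Option Int × Option Int × List (Int × Int)) (index : Int) :
    Option Int × Option Int × List (Int × Int) :=
  match st with
  | (e?, l?, out) =>
    match e? with
    | none => (some index, some index, out)
    | some e =>
      match l? with
      | none => (some e, some index, out)   -- unreachable: last is set whenever end is
      | some l =>
        if l - index > 1 then (some index, some index, out ++ [(l, e)])
        else (some e, some index, out)

def reversed_range_iterator (indexes : List Int) : List (Int × Int) :=
  match ((PySem.List.sorted indexes (fun x => x) false).reverse).foldl pvALoop (none, none, []) with
  | (e?, l?, out) =>
    -- for-else: after the loop, 'if indexes: yield (last, end)'; last/end are set iff indexes ≠ []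
    if indexes = [] then out else out ++ [(l?.getD 0, e?.getD 0)]

-- ===== PORT B =====
def pvBStep (runs : List (Int × Int)) (i : Int) : List (Int × Int) :=
  match runs.getLast? with
  | none => [(i, i)]
  | some (lo, hi) => if i - hi ≤ 1 then runs.dropLast ++ [(lo, i)] else runs ++ [(i, i)]

def reversed_range_iterator_alt (indexes : List Int) : List (Int × Int) :=
  (((PySem.List.sorted indexes (fun x => x) false).foldl pvBStep []).reverse)

-- ===== PRECONDITION & SPEC =====
def Spec_reversed_range_iterator (indexes : List Int) (out : List (Int × Int)) : Prop := out = reversed_range_iterator_alt indexes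
instance (indexes : List Int) (out : List (Int × Int)) : Decidable (Spec_reversed_range_iterator indexes out) := by unfold Spec_reversed_range_iterator; infer_instance

-- ===== CLAIM (what is proved, stated in full; the proofs are below) =====
def Claim_equal_reversed_range_iterator : Prop := ∀ (indexes : List Int), Dom_reversed_range_iterator indexes → Spec_reversed_range_iterator indexes (reversed_range_iterator indexes)

-- ===== LEMMAS AND PROOFS =====

-- front-based twin of pvBStep: newest run kept at the head instead of the tail
def pvBFront (runs : List (Int × Int)) (i : Int) : List (Int × Int) :=
  match runs with
  | (lo, hi) :: rest => if i - hi ≤ 1 then (lo, i) :: rest else (i, i) :: (lo, hi) :: rest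
  | [] => [(i, i)]

theorem pvBStep_rev (rs : List (Int × Int)) (y : Int) :
    (pvBStep rs y).reverse = pvBFront rs.reverse y := by
  rcases List.eq_nil_or_concat rs with h | ⟨dl, p, h⟩
  · subst h; rfl
  · obtain ⟨lo, hi⟩ := p
    subst h
    have hg : (dl.concat (lo, hi)).getLast? = some (lo, hi) := by simp
    have hd : (dl.concat (lo, hi)).dropLast = dl := by simp
    simp only [pvBStep, hg, hd]
    split_ifs with h1 <;> simp [pvBFront, h1]

theorem pvB_rev (t : List Int) : ∀ (rs : List (Int × Int)),
    (List.foldl pvBStep rs t).reverse = List.foldl pvBFront rs.reverse t := by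
  induction t with
  | nil => intro rs; rfl
  | cons y t ih =>
    intro rs
    simp only [List.foldl_cons]
    rw [ih, pvBStep_rev]

-- reference runs builder (low-to-high), by recursion on the head (smallest-first)
def pvRStep (x : Int) (rs : List (Int × Int)) : List (Int × Int) :=
  match rs with
  | [] => [(x, x)]
  | (lo, hi) :: rest => if lo - x > 1 then (x, x) :: (lo, hi) :: rest else (x, hi) :: rest

def pvR (l : List Int) : List (Int × Int) := l.foldr pvRStep []

-- generalisation of pvRStep to a seed run (a, b)
def pvSStep (a b : Int) (rs : List (Int × Int)) : List (Int × Int) :=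
  match rs with
  | [] => [(a, b)]
  | (lo, hi) :: rest => if lo - b ≤ 1 then (a, hi) :: rest else (a, b) :: (lo, hi) :: rest

theorem pvBFront_seed (t : List Int) : ∀ (r : Int × Int) (rest : List (Int × Int)),
    List.foldl pvBFront (r :: rest) t = List.foldl pvBFront [r] t ++ rest := by
  induction t with
  | nil => intro r rest; simp
  | cons y t ih =>
    intro r rest
    obtain ⟨lo, hi⟩ := r
    simp only [List.foldl_cons, pvBFront]
    split_ifs with h
    · exact ih _ _
    · rw [ih ((y, y)) ((lo, hi) :: rest), ih ((y, y)) [(lo, hi)]]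
      simp

theorem pvS_self (y : Int) (rs : List (Int × Int)) : pvSStep y y rs = pvRStep y rs := by
  cases rs with
  | nil => rfl
  | cons p rest =>
    obtain ⟨lo, hi⟩ := p
    by_cases h2 : lo - y > 1
    · have h3 : ¬ lo - y ≤ 1 := by omega
      simp [pvSStep, pvRStep, h2, h3]
    · have h3 : lo - y ≤ 1 := by omega
      simp [pvSStep, pvRStep, h2, h3]

theorem pvB_seed (t : List Int) : ∀ (a b : Int),
    List.foldl pvBFront [(a, b)] t = (pvSStep a b (pvR t)).reverse := by
  induction t with
  | nil => intro a b; simp [pvSStep, pvR]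
  | cons y t ih =>
    intro a b
    have hR : pvR (y :: t) = pvRStep y (pvR t) := rfl
    simp only [List.foldl_cons, pvBFront]
    split_ifs with h
    · -- y - b ≤ 1 : the seed run is extended to (a, y)
      rw [ih a y, hR]
      congr 1
      cases hrt : pvR t with
      | nil => simp [pvSStep, pvRStep, h]
      | cons p rest =>
        obtain ⟨lo, hi⟩ := p
        by_cases h2 : lo - y > 1
        · have h3 : ¬ lo - y ≤ 1 := by omega
          simp [pvSStep, pvRStep, h2, h3, h]
        · have h3 : lo - y ≤ 1 := by omega
          simp [pvSStep, pvRStep, h2, h3, h]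
    · -- y - b > 1 : a fresh run (y, y) is started above the seed
      rw [pvBFront_seed t ((y, y)) [(a, b)], ih y y, pvS_self, hR]
      have hhead : ∃ h' rest', pvRStep y (pvR t) = (y, h') :: rest' := by
        cases pvR t with
        | nil => exact ⟨y, [], rfl⟩
        | cons p rest =>
          obtain ⟨lo, hi⟩ := p
          by_cases h2 : lo - y > 1
          · exact ⟨y, (lo, hi) :: rest, by simp [pvRStep, h2]⟩
          · exact ⟨hi, rest, by simp [pvRStep, h2]⟩
      obtain ⟨h', rest', he⟩ := hhead
      rw [he]
      have hs : pvSStep a b ((y, h') :: rest') = (a, b) :: (y, h') :: rest' := by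
        have h3 : ¬ y - b ≤ 1 := by omega
        simp [pvSStep, h3]
      rw [hs]
      simp

theorem pvB_eq_R (l : List Int) : List.foldl pvBFront [] l = (pvR l).reverse := by
  cases l with
  | nil => rfl
  | cons x t =>
    have : List.foldl pvBFront [] (x :: t) = List.foldl pvBFront [(x, x)] t := rfl
    rw [this, pvB_seed, pvS_self]; rfl

theorem pvA_state (l : List Int) :
    List.foldr (fun x st => pvALoop st x) (none, none, []) l =
      (match pvR l with
       | [] => ((none : Option Int), (none : Option Int), ([] : List (Int × Int)))
       | (lo, hi) :: rest => (some hi, some lo, rest.reverse)) := by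
  induction l with
  | nil => rfl
  | cons x t ih =>
    simp only [List.foldr_cons, ih]
    have hR : pvR (x :: t) = pvRStep x (pvR t) := rfl
    cases hrt : pvR t with
    | nil => simp [hR, hrt, pvALoop, pvRStep]
    | cons p rest =>
      obtain ⟨lo, hi⟩ := p
      by_cases h2 : lo - x > 1
      · simp [hR, hrt, pvALoop, pvRStep, h2]
      · simp [hR, hrt, pvALoop, pvRStep, h2]

theorem pvR_ne_nil (x : Int) (t : List Int) : pvR (x :: t) ≠ [] := by
  have hR : pvR (x :: t) = pvRStep x (pvR t) := rfl
  rw [hR]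
  cases pvR t with
  | nil => simp [pvRStep]
  | cons p rest =>
    obtain ⟨lo, hi⟩ := p
    by_cases h2 : lo - x > 1 <;> simp [pvRStep, h2]

-- ===== VERDICT (by name: the statement is the Claim_ definition above) =====
theorem reversed_range_iterator_spec : Claim_equal_reversed_range_iterator := by
  intro indexes _
  unfold Spec_reversed_range_iterator reversed_range_iterator reversed_range_iterator_alt
  rw [List.foldl_reverse, pvA_state, pvB_rev, List.reverse_nil, pvB_eq_R]
  by_cases hn : indexes = []
  · subst hn; rfl
  · simp only [hn, if_false]
    cases hs : PySem.List.sorted indexes (fun x => x) false with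
    | nil =>
      have hp := PySem.List.sorted_perm (xs := indexes) (key := fun x => x) (rev := false)
      rw [hs] at hp
      exact absurd hp.symm.eq_nil hn
    | cons x t =>
      cases hr : pvR (x :: t) with
      | nil => exact absurd hr (pvR_ne_nil x t)
      | cons p rest =>
        obtain ⟨lo, hi⟩ := p
        simp
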